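-- pv_equiv track=rewrite | github.com/thinety/cpnb | cses/introductory_problems/two_knights.py | solve
-- ===== SOURCE A (Python) =====
-- def solve(n):
--     ans = []
--
--     for k in range(1, n+1):
--         if k == 1:
--             """
--             a
--             """
--             ans.append(0)
--             continue
--
--         if k == 2:
--             """
--             aa
--             aa
--             """
--             ans.append(4*3//2)
--             continue
--
--         if k == 3:
--             """
--             aaa
--             aba
--             aaa
--             """
--             a = 8 * (3**2 - 1 - 2)
--             b = 1 * (3**2 - 1)
--             ans.append((a+b)//2)
--             continue
--
--         """
--         abcc...ccba
--         bcdd...ddcb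
--         cdee...eedc
--         cdee...eedc
--         ....   ....
--         ....   ....
--         ....   ....
--         cdee...eedc
--         cdee...eedc
--         bcdd...ddcb
--         abcc...ccba
--         """
--         a = 4 * 1 * (k**2 - 1 - 2)
--         b = 4 * 2 * (k**2 - 1 - 3)
--         c = 4 * (k-3) * (k**2 - 1 - 4)
--         d = 4 * (k-4) * (k**2 - 1 - 6)
--         e = (k-4)**2 * (k**2 - 1 - 8)
--
--         ans.append((a+b+c+d+e)//2)
--
--     return ans
-- ===== SOURCE B (Python) =====
-- def solve(n):
--     # Incremental finite-difference scheme: the count for board size k is a degree-4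
--     # integer polynomial in k, so each next value is obtained from the previous one
--     # by propagating four running difference accumulators (additions only).
--     ans = []
--     d0, d1, d2, d3 = 0, 6, 16, 30
--     for _ in range(1, n+1):
--         ans.append(d0)
--         d0, d1, d2, d3 = d0 + d1, d1 + d2, d2 + d3, d3 + 12
--     return ans
-- ===== Notes on version B (the rewrite author's own statement) =====
-- stated objective: faster
-- what changed: Replaces A's per-k case analysis and five-term region sum by an incremental finite-difference recurrence: four running difference accumulators are propagated with additions only, no per-step polynomial evaluation or division.
import Mathlib
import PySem

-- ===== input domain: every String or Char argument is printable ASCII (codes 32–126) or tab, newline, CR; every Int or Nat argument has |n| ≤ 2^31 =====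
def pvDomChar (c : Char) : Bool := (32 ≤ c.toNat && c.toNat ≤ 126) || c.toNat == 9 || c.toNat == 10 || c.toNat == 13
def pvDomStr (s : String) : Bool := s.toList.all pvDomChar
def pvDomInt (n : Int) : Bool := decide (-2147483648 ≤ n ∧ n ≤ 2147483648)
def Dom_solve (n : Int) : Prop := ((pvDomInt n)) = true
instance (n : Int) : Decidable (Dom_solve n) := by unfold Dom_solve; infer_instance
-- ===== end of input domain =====

-- B replaces A's per-k case analysis and five-term region sum by an incremental
-- finite-difference recurrence over four running accumulators (objective: alternative).

-- ===== PORT A =====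
def solve (n : Int) : List Int :=
  (PySem.List.pyRange 1 (n + 1) 1).foldl (fun ans k =>
    if k = 1 then ans ++ [0]
    else if k = 2 then ans ++ [PySem.Int.floordiv (4 * 3) 2]
    else if k = 3 then
      let a := 8 * ((3 : Int) ^ 2 - 1 - 2)
      let b := 1 * ((3 : Int) ^ 2 - 1)
      ans ++ [PySem.Int.floordiv (a + b) 2]
    else
      let a := 4 * 1 * (k ^ 2 - 1 - 2)
      let b := 4 * 2 * (k ^ 2 - 1 - 3)
      let c := 4 * (k - 3) * (k ^ 2 - 1 - 4)
      let d := 4 * (k - 4) * (k ^ 2 - 1 - 6)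
      let e := (k - 4) ^ 2 * (k ^ 2 - 1 - 8)
      ans ++ [PySem.Int.floordiv (a + b + c + d + e) 2]) []

-- ===== PORT B =====
-- state: (ans, d0, d1, d2, d3); each loop step appends d0 and propagates the differences
def solve_alt (n : Int) : List Int :=
  ((PySem.List.pyRange 1 (n + 1) 1).foldl
    (fun (s : List Int × Int × Int × Int × Int) _ =>
      let (ans, d0, d1, d2, d3) := s
      (ans ++ [d0], d0 + d1, d1 + d2, d2 + d3, d3 + 12))
    ([], 0, 6, 16, 30)).1

-- ===== PRECONDITION & SPEC =====
def Spec_solve (n : Int) (out : List Int) : Prop := out = solve_alt n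
instance (n : Int) (out : List Int) : Decidable (Spec_solve n out) := by unfold Spec_solve; infer_instance

-- ===== CLAIM (what is proved, stated in full; the proofs are below) =====
def Claim_equal_solve : Prop := ∀ (n : Int), Dom_solve n → Spec_solve n (solve n)

-- ===== LEMMAS AND PROOFS =====

-- proof-side closed form: per-k value both programs produce
def pvV (k : Int) : Int :=
  PySem.Int.floordiv (k * k * (k * k - 1)) 2 - 4 * (k - 1) * (k - 2)
def pvD1 (k : Int) : Int := 2 * k ^ 3 + 3 * k ^ 2 - 7 * k + 8
def pvD2 (k : Int) : Int := 6 * k ^ 2 + 12 * k - 2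
def pvD3 (k : Int) : Int := 12 * k + 18

-- the per-k value appended by A equals pvV, for every integer k
theorem pv_step_eq (k : Int) :
    (if k = 1 then (0 : Int)
     else if k = 2 then PySem.Int.floordiv (4 * 3) 2
     else if k = 3 then PySem.Int.floordiv (8 * ((3 : Int) ^ 2 - 1 - 2) + 1 * ((3 : Int) ^ 2 - 1)) 2
     else PySem.Int.floordiv (4 * 1 * (k ^ 2 - 1 - 2) + 4 * 2 * (k ^ 2 - 1 - 3)
            + 4 * (k - 3) * (k ^ 2 - 1 - 4) + 4 * (k - 4) * (k ^ 2 - 1 - 6)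
            + (k - 4) ^ 2 * (k ^ 2 - 1 - 8)) 2)
      = pvV k := by
  by_cases h1 : k = 1
  · subst h1; decide
  by_cases h2 : k = 2
  · subst h2; decide
  by_cases h3 : k = 3
  · subst h3; decide
  simp only [h1, h2, h3, if_false, pvV]
  obtain ⟨m, hm⟩ := Int.even_mul_succ_self k
  have hS : 4 * 1 * (k ^ 2 - 1 - 2) + 4 * 2 * (k ^ 2 - 1 - 3)
      + 4 * (k - 3) * (k ^ 2 - 1 - 4) + 4 * (k - 4) * (k ^ 2 - 1 - 6)
      + (k - 4) ^ 2 * (k ^ 2 - 1 - 8)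
      = 2 * (m * (k * (k - 1)) - 4 * ((k - 1) * (k - 2))) := by
    linear_combination (k * (k - 1)) * hm
  have hT : k * k * (k * k - 1) = 2 * (m * (k * (k - 1))) := by
    linear_combination (k * (k - 1)) * hm
  rw [hS, hT, PySem.Int.floordiv_eq_ediv_of_pos (by norm_num),
      PySem.Int.floordiv_eq_ediv_of_pos (by norm_num),
      Int.mul_ediv_cancel_left _ (by norm_num), Int.mul_ediv_cancel_left _ (by norm_num)]
  ring

-- A's result is the map of pvV over the range
theorem pv_solve_eq_map (n : Int) :
    solve n = (PySem.List.pyRange 1 (n + 1) 1).map pvV := by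
  unfold solve
  have hf : (fun (ans : List Int) (k : Int) =>
      if k = 1 then ans ++ [0]
      else if k = 2 then ans ++ [PySem.Int.floordiv (4 * 3) 2]
      else if k = 3 then
        let a := 8 * ((3 : Int) ^ 2 - 1 - 2)
        let b := 1 * ((3 : Int) ^ 2 - 1)
        ans ++ [PySem.Int.floordiv (a + b) 2]
      else
        let a := 4 * 1 * (k ^ 2 - 1 - 2)
        let b := 4 * 2 * (k ^ 2 - 1 - 3)
        let c := 4 * (k - 3) * (k ^ 2 - 1 - 4)
        let d := 4 * (k - 4) * (k ^ 2 - 1 - 6)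
        let e := (k - 4) ^ 2 * (k ^ 2 - 1 - 8)
        ans ++ [PySem.Int.floordiv (a + b + c + d + e) 2])
      = fun ans k => ans ++ [pvV k] := by
    funext ans k
    have := pv_step_eq k
    split_ifs with h1 h2 h3 <;> simp_all
  rw [hf, PySem.List.foldl_append_singleton_eq_map]
  simp

-- the difference recurrences
theorem pvV_step (k : Int) : pvV (k + 1) = pvV k + pvD1 k := by
  unfold pvV pvD1
  obtain ⟨m, hm⟩ := Int.even_mul_succ_self k
  have hT : k * k * (k * k - 1) = 2 * (m * (k * (k - 1))) := by
    linear_combination (k * (k - 1)) * hm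
  have hU : (k + 1) * (k + 1) * ((k + 1) * (k + 1) - 1)
      = 2 * (m * ((k + 1) * (k + 2))) := by
    linear_combination ((k + 1) * (k + 2)) * hm
  rw [hT, hU, PySem.Int.floordiv_eq_ediv_of_pos (by norm_num),
      PySem.Int.floordiv_eq_ediv_of_pos (by norm_num),
      Int.mul_ediv_cancel_left _ (by norm_num), Int.mul_ediv_cancel_left _ (by norm_num)]
  linear_combination (-(2 * k + 1)) * hm

theorem pvD1_step (k : Int) : pvD1 (k + 1) = pvD1 k + pvD2 k := by unfold pvD1 pvD2; ring
theorem pvD2_step (k : Int) : pvD2 (k + 1) = pvD2 k + pvD3 k := by unfold pvD2 pvD3; ring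
theorem pvD3_step (k : Int) : pvD3 (k + 1) = pvD3 k + 12 := by unfold pvD3; ring

-- invariant of B's fold: only the length of the traversed list matters
theorem pv_fold_inv (m : Nat) : ∀ (j : Int) (acc : List Int),
    (PySem.List.pyRange j (j + (m : Int)) 1).foldl
      (fun (s : List Int × Int × Int × Int × Int) _ =>
        let (ans, d0, d1, d2, d3) := s
        (ans ++ [d0], d0 + d1, d1 + d2, d2 + d3, d3 + 12))
      (acc, pvV j, pvD1 j, pvD2 j, pvD3 j)
    = (acc ++ (PySem.List.pyRange j (j + (m : Int)) 1).map pvV,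
       pvV (j + m), pvD1 (j + m), pvD2 (j + m), pvD3 (j + m)) := by
  induction m with
  | zero => intro j acc; simp [PySem.List.pyRange_one_eq_nil (le_refl j)]
  | succ m ih =>
    intro j acc
    have hcons : PySem.List.pyRange j (j + ((m + 1 : Nat) : Int)) 1
        = j :: PySem.List.pyRange (j + 1) (j + ((m + 1 : Nat) : Int)) 1 :=
      PySem.List.pyRange_one_cons (by push_cast; omega)
    have hend : j + ((m + 1 : Nat) : Int) = (j + 1) + (m : Int) := by push_cast; omega
    rw [hcons, List.foldl_cons, List.map_cons]
    simp only []
    rw [← pvV_step, ← pvD1_step, ← pvD2_step, ← pvD3_step, hend, ih (j + 1) (acc ++ [pvV j])]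
    simp [List.append_assoc]

-- ===== VERDICT (by name: the statement is the Claim_ definition above) =====
theorem solve_spec : Claim_equal_solve := by
  intro n _
  unfold Spec_solve
  rw [pv_solve_eq_map]
  unfold solve_alt
  by_cases hn : n ≤ 0
  · rw [PySem.List.pyRange_one_eq_nil (by omega)]
    simp
  · have h1 : n + 1 = 1 + ((n.toNat : Int)) := by omega
    have h0 : pvV 1 = 0 := by decide
    have hd1 : pvD1 1 = 6 := by decide
    have hd2 : pvD2 1 = 16 := by decide
    have hd3 : pvD3 1 = 30 := by decide
    rw [h1, ← h0, ← hd1, ← hd2, ← hd3, pv_fold_inv n.toNat 1 []]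
    simp
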